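-- pv_equiv track=rewrite | github.com/shershulya/Mathematical_Methods_of_Data_Visualization | 1 TreeVisualization/main.py | FindAspectRatio
-- ===== SOURCE A (Python) =====
-- def FindAspectRatio(G, h, w, root, max_h, max_w):
--   if (not G[root]):
--     return h, w, w
--   for i, child in enumerate(G[root]):
--     if (i == 0):
--       tmp_h, tmp_w, w = FindAspectRatio(G, h + 1, w, child, max_h, max_w)
--     else:
--       tmp_h, tmp_w, w = FindAspectRatio(G, h, w + 1, child, max_h, max_w)
--     if (tmp_h > max_h):
--         max_h = tmp_h
--     if (tmp_w > max_w):
--       max_w = tmp_w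
--   return max_h, max_w, w
-- ===== SOURCE B (Python) =====
-- def FindAspectRatio(G, h, w, root, max_h, max_w):
--   if not G[root]:
--     return h, w, w
--   leaves, tallest = _leaf_stats(G, root, h)
--   wf = w + leaves - 1
--   return max(max_h, tallest), max(max_w, wf), wf
--
-- def _leaf_stats(G, node, h):
--   cs = G[node]
--   if not cs:
--     return 1, h
--   total, best = _leaf_stats(G, cs[0], h + 1)
--   for c in cs[1:]:
--     l, b = _leaf_stats(G, c, h)
--     total += l
--     best = max(best, b)
--   return total, best
-- ===== Notes on version B (the rewrite author's own statement) =====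
-- stated objective: alternative
-- what changed: A threads the running width and both running maxima (w, max_h, max_w) through every recursive call and returns a triple from each subtree; B instead computes two pure aggregates per subtree - leaf count and maximum leaf height (height grows only into the first child) - with a plain recursive scan, and obtains A's triple by the closed formula (max(max_h, tallest), max(max_w, w+leaves-1), w+leaves-1) at the top.
import Mathlib
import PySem

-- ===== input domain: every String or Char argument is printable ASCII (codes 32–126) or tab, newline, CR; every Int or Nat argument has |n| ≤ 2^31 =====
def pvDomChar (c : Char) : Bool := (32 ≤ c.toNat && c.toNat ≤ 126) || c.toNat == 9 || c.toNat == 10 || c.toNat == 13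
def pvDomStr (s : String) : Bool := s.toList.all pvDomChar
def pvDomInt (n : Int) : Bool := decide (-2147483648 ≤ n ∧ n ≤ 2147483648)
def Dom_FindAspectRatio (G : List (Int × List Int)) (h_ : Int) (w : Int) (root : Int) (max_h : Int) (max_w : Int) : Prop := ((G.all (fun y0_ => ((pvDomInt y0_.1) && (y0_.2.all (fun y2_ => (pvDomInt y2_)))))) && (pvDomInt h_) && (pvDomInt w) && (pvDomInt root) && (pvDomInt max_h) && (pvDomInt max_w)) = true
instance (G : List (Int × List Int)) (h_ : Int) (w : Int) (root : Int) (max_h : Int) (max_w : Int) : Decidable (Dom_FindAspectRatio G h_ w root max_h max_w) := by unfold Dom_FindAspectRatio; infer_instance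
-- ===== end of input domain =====

-- B replaces A's recursion that threads (w, max_h, max_w) through every call by a pure scan
-- computing (leaf count, max leaf height) per subtree, combined by a closed formula at the top
-- (objective: alternative decomposition; return value only — neither version mutates its arguments).

-- G is a Python dict[int, list[int]] as an association list; G[x] = value of the FIRST pair with key x
-- (exact for Python dicts, whose keys are unique), none = KeyError.
def pvLookup (G : List (Int × List Int)) (x : Int) : Option (List Int) :=
  (G.find? (fun p => p.1 == x)).map Prod.snd

-- ===== PORT A =====
-- A's recursion, fuelled: `none` = KeyError / fuel exhausted (under Pre_ the fuel, one more
-- than G's length, is never exhausted; Python instead recurses without a bound).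
mutual
def FindAspectRatio_fuel (G : List (Int × List Int)) (fuel : Nat) (h_ w root max_h max_w : Int) : Option (Int × Int × Int) :=
  match fuel with
  | 0 => none
  | f + 1 =>
    match pvLookup G root with
    | none => none
    | some cs =>
      if cs = [] then some (h_, w, w)
      else FindAspectRatio_loop G f h_ 0 cs w max_h max_w
termination_by (fuel, 0, 0)

-- the `for i, child in enumerate(G[root])` loop, over the remaining children cs at index i
def FindAspectRatio_loop (G : List (Int × List Int)) (f : Nat) (h_ : Int) (i : Nat) (cs : List Int) (w max_h max_w : Int) : Option (Int × Int × Int) :=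
  match cs with
  | [] => some (max_h, max_w, w)
  | c :: rest =>
    match (if i = 0 then FindAspectRatio_fuel G f (h_ + 1) w c max_h max_w
           else FindAspectRatio_fuel G f h_ (w + 1) c max_h max_w) with
    | none => none
    | some (tmp_h, tmp_w, w') =>
      FindAspectRatio_loop G f h_ (i + 1) rest w'
        (if tmp_h > max_h then tmp_h else max_h)
        (if tmp_w > max_w then tmp_w else max_w)
termination_by (f, 1, cs.length)
end

def FindAspectRatio (G : List (Int × List Int)) (h_ : Int) (w : Int) (root : Int) (max_h : Int) (max_w : Int) : Int × Int × Int :=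
  -- (0,0,0) only where the Python raises (outside Pre_)
  (FindAspectRatio_fuel G (G.length + 1) h_ w root max_h max_w).getD (0, 0, 0)

-- ===== PORT B =====
-- _leaf_stats: (number of leaves, max leaf height) of the subtree at node, fuelled like A's recursion.
mutual
def pvScan (G : List (Int × List Int)) (fuel : Nat) (node h : Int) : Option (Int × Int) :=
  match fuel with
  | 0 => none
  | f + 1 =>
    match pvLookup G node with
    | none => none
    | some [] => some (1, h)
    | some (c :: rest) =>
      match pvScan G f c (h + 1) with
      | none => none
      | some tb => pvScanRest G f h rest tb
termination_by (fuel, 0, 0)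

-- the `for c in cs[1:]` loop of _leaf_stats, folding (total, best)
def pvScanRest (G : List (Int × List Int)) (f : Nat) (h : Int) (cs : List Int) (acc : Int × Int) : Option (Int × Int) :=
  match cs with
  | [] => some acc
  | c :: rest =>
    match pvScan G f c h with
    | none => none
    | some (l, b) => pvScanRest G f h rest (acc.1 + l, max acc.2 b)
termination_by (f, 1, cs.length)
end

def FindAspectRatio_alt (G : List (Int × List Int)) (h_ : Int) (w : Int) (root : Int) (max_h : Int) (max_w : Int) : Int × Int × Int :=
  match pvLookup G root with
  | none => (0, 0, 0)         -- KeyError in Python (outside Pre_)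
  | some [] => (h_, w, w)
  | some _ =>
    match pvScan G (G.length + 1) root h_ with
    | none => (0, 0, 0)       -- unreachable under Pre_
    | some (leaves, tallest) =>
      (max max_h tallest, max max_w (w + leaves - 1), w + leaves - 1)

-- ===== PRECONDITION & SPEC =====
def pvKeys (G : List (Int × List Int)) : List Int := G.map Prod.fst
def pvChildren (G : List (Int × List Int)) (n : Int) : List Int := (pvLookup G n).getD []
-- one step of the reachable-set closure
def pvStep (G : List (Int × List Int)) (S : List Int) : List Int :=
  S.foldl (fun acc n => (pvChildren G n).foldl (fun a c => PySem.Set.add a c) acc) S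
-- the nodes reachable from root (that many closure steps saturate: layers beyond the number of keys add nothing)
def pvReach (G : List (Int × List Int)) (root : Int) : List Int :=
  (pvStep G)^[G.length.succ] (PySem.Set.ofList [root])

-- the descendants of n: closure from n's children (saturated after that many steps)
def pvDesc (G : List (Int × List Int)) (n : Int) : List Int :=
  (pvStep G)^[G.length.succ] (PySem.Set.ofList (pvChildren G n))

-- Pre_ holds exactly when A's recursion terminates without an exception: root is a key, every
-- node reachable from root has all its children among the keys, and no reachable node lies on a
-- cycle (i.e. is its own descendant); outside Pre_ the Python raises (KeyError / RecursionError).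
def Pre_FindAspectRatio (G : List (Int × List Int)) (h_ : Int) (w : Int) (root : Int) (max_h : Int) (max_w : Int) : Prop :=
  ((pvKeys G).contains root
    && (pvReach G root).all (fun n => (pvChildren G n).all (fun c =>
         (pvKeys G).contains c && (pvReach G root).contains c))
    && (pvReach G root).all (fun n => !((pvDesc G n).contains n))) = true
instance (G : List (Int × List Int)) (h_ : Int) (w : Int) (root : Int) (max_h : Int) (max_w : Int) : Decidable (Pre_FindAspectRatio G h_ w root max_h max_w) := by unfold Pre_FindAspectRatio; infer_instance

def pvWitness_FindAspectRatio : (List (Int × List Int)) × Int × Int × Int × Int × Int :=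
  ([(0, [1, 2]), (1, []), (2, [3]), (3, [])], 0, 0, 0, 0, 0)

def Spec_FindAspectRatio (G : List (Int × List Int)) (h_ : Int) (w : Int) (root : Int) (max_h : Int) (max_w : Int) (out : Int × Int × Int) : Prop := out = FindAspectRatio_alt G h_ w root max_h max_w
instance (G : List (Int × List Int)) (h_ : Int) (w : Int) (root : Int) (max_h : Int) (max_w : Int) (out : Int × Int × Int) : Decidable (Spec_FindAspectRatio G h_ w root max_h max_w out) := by unfold Spec_FindAspectRatio; infer_instance

-- ===== CLAIM (what is proved, stated in full; the proofs are below) =====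
def Claim_equal_FindAspectRatio : Prop := ∀ (G : List (Int × List Int)) (h_ : Int) (w : Int) (root : Int) (max_h : Int) (max_w : Int), Dom_FindAspectRatio G h_ w root max_h max_w → Pre_FindAspectRatio G h_ w root max_h max_w → Spec_FindAspectRatio G h_ w root max_h max_w (FindAspectRatio G h_ w root max_h max_w)

-- ===== LEMMAS AND PROOFS =====

-- proof-side helpers
def pvF (G : List (Int × List Int)) : Nat := G.length + 1
def pvL (G : List (Int × List Int)) (n : Int) : Int := ((pvScan G (pvF G) n 0).getD (1, 0)).1
def pvH (G : List (Int × List Int)) (n h : Int) : Int := ((pvScan G (pvF G) n h).getD (1, h)).2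

theorem pv_lookup_eq (G : List (Int × List Int)) (n : Int) (hk : (pvKeys G).contains n = true) :
    pvLookup G n = some (pvChildren G n) := by
  rw [List.contains_iff_mem] at hk
  simp only [pvKeys, List.mem_map] at hk
  obtain ⟨p, hp, hp1⟩ := hk
  have : (G.find? (fun p => p.1 == n)).isSome := by
    rw [List.find?_isSome]
    exact ⟨p, hp, by simp [hp1]⟩
  obtain ⟨q, hq⟩ := Option.isSome_iff_exists.mp this
  simp [pvLookup, pvChildren, hq]

theorem pv_mem_inner_foldl (l : List Int) (x : Int) :
    ∀ acc : List Int, x ∈ acc → x ∈ l.foldl (fun a c => PySem.Set.add a c) acc := by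
  induction l with
  | nil => intro acc h; simpa using h
  | cons c t ih =>
    intro acc h
    exact ih _ ((PySem.Set.mem_add acc c x).mpr (Or.inl h))

theorem pv_mem_step (G : List (Int × List Int)) (S : List Int) (x : Int) (h : x ∈ S) :
    x ∈ pvStep G S := by
  unfold pvStep
  have : ∀ (l : List Int) (acc : List Int), x ∈ acc →
      x ∈ l.foldl (fun acc n => (pvChildren G n).foldl (fun a c => PySem.Set.add a c) acc) acc := by
    intro l
    induction l with
    | nil => intro acc h; simpa using h
    | cons c t ih => intro acc h; exact ih _ (pv_mem_inner_foldl _ _ _ h)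
  exact this S S h

theorem pv_root_mem_reach (G : List (Int × List Int)) (root : Int) : root ∈ pvReach G root := by
  unfold pvReach
  have : ∀ (k : Nat) (S : List Int), root ∈ S → root ∈ (pvStep G)^[k] S := by
    intro k
    induction k with
    | zero => intro S h; simpa using h
    | succ k ih =>
      intro S h
      rw [Function.iterate_succ_apply]
      exact ih _ (pv_mem_step G S root h)
  exact this _ _ ((PySem.Set.mem_ofList [root] root).mpr (by simp))

theorem pv_pre_child (G : List (Int × List Int)) (h0 w0 root mh0 mw0 : Int)
    (hPre : Pre_FindAspectRatio G h0 w0 root mh0 mw0) :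
    ∀ n ∈ pvReach G root, ∀ c ∈ pvChildren G n,
      (pvKeys G).contains c = true ∧ c ∈ pvReach G root := by
  unfold Pre_FindAspectRatio at hPre
  simp only [Bool.and_eq_true, List.all_eq_true] at hPre
  intro n hn c hc
  obtain ⟨h1, h2⟩ := hPre.1.2 n hn c hc
  exact ⟨h1, List.contains_iff_mem.mp h2⟩

theorem pv_pre_acyclic (G : List (Int × List Int)) (h0 w0 root mh0 mw0 : Int)
    (hPre : Pre_FindAspectRatio G h0 w0 root mh0 mw0) :
    ∀ n ∈ pvReach G root, n ∉ pvDesc G n := by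
  unfold Pre_FindAspectRatio at hPre
  simp only [Bool.and_eq_true, List.all_eq_true] at hPre
  intro n hn hmem
  have := hPre.2 n hn
  rw [Bool.not_eq_true', ← Bool.not_eq_true] at this
  exact this (List.contains_iff_mem.mpr hmem)

theorem pv_pre_root (G : List (Int × List Int)) (h0 w0 root mh0 mw0 : Int)
    (hPre : Pre_FindAspectRatio G h0 w0 root mh0 mw0) : (pvKeys G).contains root = true := by
  unfold Pre_FindAspectRatio at hPre
  simp only [Bool.and_eq_true] at hPre
  exact hPre.1.1

theorem pv_mem_iter (G : List (Int × List Int)) (k : Nat) (S : List Int) (x : Int) (h : x ∈ S) :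
    x ∈ (pvStep G)^[k] S := by
  induction k generalizing S with
  | zero => simpa using h
  | succ k ih =>
    rw [Function.iterate_succ_apply]
    exact ih _ (pv_mem_step G S x h)

theorem pv_iter_up (G : List (Int × List Int)) (a b : Nat) (S : List Int) (x : Int)
    (hab : a ≤ b) (h : x ∈ (pvStep G)^[a] S) : x ∈ (pvStep G)^[b] S := by
  obtain ⟨d, rfl⟩ : ∃ d, b = d + a := ⟨b - a, by omega⟩
  rw [Function.iterate_add_apply]
  exact pv_mem_iter G d _ x h

theorem pv_mem_inner_self (l : List Int) (y : Int) :
    ∀ acc : List Int, y ∈ l → y ∈ l.foldl (fun a c => PySem.Set.add a c) acc := by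
  induction l with
  | nil => intro acc h; simp at h
  | cons c t ih =>
    intro acc h
    simp only [List.foldl_cons]
    rcases List.mem_cons.mp h with h | h
    · subst h
      exact pv_mem_inner_foldl t y _ ((PySem.Set.mem_add acc y y).mpr (Or.inr rfl))
    · exact ih _ h

theorem pv_mem_step_child (G : List (Int × List Int)) (S : List Int) (x y : Int)
    (hx : x ∈ S) (hy : y ∈ pvChildren G x) : y ∈ pvStep G S := by
  unfold pvStep
  have hpres : ∀ (l : List Int) (acc : List Int), y ∈ acc →
      y ∈ l.foldl (fun acc n => (pvChildren G n).foldl (fun a c => PySem.Set.add a c) acc) acc := by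
    intro l
    induction l with
    | nil => intro acc h; simpa using h
    | cons c t ih => intro acc h; exact ih _ (pv_mem_inner_foldl _ _ _ h)
  have : ∀ (l : List Int) (acc : List Int), x ∈ l →
      y ∈ l.foldl (fun acc n => (pvChildren G n).foldl (fun a c => PySem.Set.add a c) acc) acc := by
    intro l
    induction l with
    | nil => intro acc h; simp at h
    | cons c t ih =>
      intro acc h
      simp only [List.foldl_cons]
      rcases List.mem_cons.mp h with h | h
      · subst h
        exact hpres t _ (pv_mem_inner_self _ _ _ hy)
      · exact ih _ h
  exact this S S hx

-- P is a child-chain ending one step before n: each entry is a parent of the next, the last a parent of n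
def pvChainOK (G : List (Int × List Int)) : List Int → Int → Prop
  | [], _ => True
  | [a], n => n ∈ pvChildren G a
  | a :: b :: l, n => b ∈ pvChildren G a ∧ pvChainOK G (b :: l) n

theorem pv_chain_extend (G : List (Int × List Int)) :
    ∀ (P : List Int) (n c : Int), pvChainOK G P n → c ∈ pvChildren G n → pvChainOK G (P ++ [n]) c
  | [], n, c, _, hc => by simpa [pvChainOK] using hc
  | [a], n, c, h, hc => by
    refine ⟨h, ?_⟩
    simpa [pvChainOK] using hc
  | a :: b :: l, n, c, h, hc =>
    ⟨h.1, pv_chain_extend G (b :: l) n c h.2 hc⟩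

theorem pv_chain_suffix (G : List (Int × List Int)) :
    ∀ (P l : List Int) (m : Int), pvChainOK G (P ++ l) m → l ≠ [] → pvChainOK G l m := by
  intro P
  induction P with
  | nil => intro l m h _; simpa using h
  | cons a P' ih =>
    intro l m h hne
    refine ih l m ?_ hne
    cases hx : P' ++ l with
    | nil => exact absurd (List.append_eq_nil_iff.mp hx).2 hne
    | cons x tl =>
      have h' : pvChainOK G (a :: x :: tl) m := by
        rw [List.cons_append, hx] at h
        exact h
      exact h'.2

theorem pv_chain_step_mem (G : List (Int × List Int)) :
    ∀ (l : List Int) (x m : Int) (S : List Int), x ∈ S → pvChainOK G (x :: l) m →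
      m ∈ (pvStep G)^[l.length + 1] S := by
  intro l
  induction l with
  | nil =>
    intro x m S hx h
    simpa using pv_mem_step_child G S x m hx h
  | cons b l' ih =>
    intro x m S hx h
    obtain ⟨hb, h2⟩ := h
    have hbS : b ∈ pvStep G S := pv_mem_step_child G S x b hx hb
    have := ih b m (pvStep G S) hbS h2
    rw [show (b :: l').length + 1 = (l'.length + 1) + 1 by simp]
    rw [Function.iterate_succ_apply]
    exact this

theorem pv_desc_of_cycle (G : List (Int × List Int)) (c : Int) (l : List Int)
    (h : pvChainOK G (c :: l) c) (hlen : l.length ≤ G.length) : c ∈ pvDesc G c := by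
  unfold pvDesc
  cases l with
  | nil =>
    exact pv_mem_iter G _ _ c ((PySem.Set.mem_ofList _ c).mpr h)
  | cons b l' =>
    obtain ⟨hb, h2⟩ := h
    have hbS : b ∈ PySem.Set.ofList (pvChildren G c) := (PySem.Set.mem_ofList _ b).mpr hb
    have := pv_chain_step_mem G l' b c _ hbS h2
    exact pv_iter_up G (l'.length + 1) (G.length + 1) _ c (by simp at hlen; omega) this

theorem pv_nodup_length_le (G : List (Int × List Int)) (l : List Int)
    (hnd : l.Nodup) (hall : ∀ x ∈ l, (pvKeys G).contains x = true) : l.length ≤ G.length := by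
  classical
  have h1 : l.toFinset.card = l.length := List.toFinset_card_of_nodup hnd
  have h2 : l.toFinset ⊆ (pvKeys G).toFinset := by
    intro x hx
    exact List.mem_toFinset.mpr (List.contains_iff_mem.mp (hall x (List.mem_toFinset.mp hx)))
  have h3 := Finset.card_le_card h2
  have h4 := (pvKeys G).toFinset_card_le
  have h5 : (pvKeys G).length = G.length := by simp [pvKeys]
  omega

-- under Pre_, a child of n cannot close a cycle back into the ancestor chain
theorem pv_no_revisit (G : List (Int × List Int)) (h0 w0 root mh0 mw0 : Int)
    (hPre : Pre_FindAspectRatio G h0 w0 root mh0 mw0)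
    (P : List Int) (n c : Int)
    (hchain : pvChainOK G (P ++ [n]) c) (hcr : c ∈ pvReach G root)
    (hnd : (P ++ [n]).Nodup) (hkeys : ∀ p ∈ P ++ [n], (pvKeys G).contains p = true) :
    c ∉ P ++ [n] := by
  intro hmem
  obtain ⟨pre, suf, hsplit⟩ := List.append_of_mem hmem
  have hcyc : pvChainOK G (c :: suf) c := by
    apply pv_chain_suffix G pre (c :: suf) c
    · rw [← hsplit]; exact hchain
    · simp
  have hlen : (P ++ [n]).length ≤ G.length := pv_nodup_length_le G _ hnd hkeys
  have hlen2 : suf.length ≤ G.length := by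
    have h1 : (pre ++ c :: suf).length = (P ++ [n]).length := by rw [hsplit]
    have h2 : (P ++ [n]).length = P.length + 1 := by simp
    simp at h1
    omega
  exact pv_pre_acyclic G h0 w0 root mh0 mw0 hPre c hcr (pv_desc_of_cycle G c suf hcyc hlen2)

theorem pvIfMax (a b : Int) : (if b > a then b else a) = max a b := by
  rw [max_def]; split_ifs <;> omega

theorem pv_foldl_max_base (cs : List Int) (g : Int → Int) :
    ∀ x y : Int, cs.foldl (fun a c => max a (g c)) (max x y) = max x (cs.foldl (fun a c => max a (g c)) y) := by
  induction cs with
  | nil => intro x y; rfl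
  | cons c t ih =>
    intro x y
    simp only [List.foldl_cons]
    rw [max_assoc, ih]

theorem pv_sum_nonneg (G : List (Int × List Int)) (cs : List Int)
    (h : ∀ c ∈ cs, 1 ≤ pvL G c) : 0 ≤ (cs.map (pvL G)).sum := by
  apply List.sum_nonneg
  intro x hx
  obtain ⟨c, hc, rfl⟩ := List.mem_map.mp hx
  linarith [h c hc]

-- the per-child step of A's loop: the child call plus the two max-updates, in closed form
theorem pvStepChar (G : List (Int × List Int)) (c : Int) (f : Nat)
    (hchar : ∀ h w mh mw, FindAspectRatio_fuel G f h w c mh mw =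
        if pvChildren G c = [] then some (h, w, w)
        else some (max mh (pvH G c h), max mw (w + pvL G c - 1), w + pvL G c - 1))
    (hl : pvChildren G c = [] → pvL G c = 1 ∧ ∀ h, pvH G c h = h) :
    ∀ h wp mh mw, ∃ th tw w', FindAspectRatio_fuel G f h wp c mh mw = some (th, tw, w') ∧
      (if th > mh then th else mh) = max mh (pvH G c h) ∧
      (if tw > mw then tw else mw) = max mw (wp + pvL G c - 1) ∧
      w' = wp + pvL G c - 1 := by
  intro h wp mh mw
  by_cases hcs : pvChildren G c = []
  · obtain ⟨hL1, hHid⟩ := hl hcs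
    refine ⟨h, wp, wp, by rw [hchar, if_pos hcs], ?_, ?_, by omega⟩
    · rw [pvIfMax, hHid]
    · rw [pvIfMax, hL1]; norm_num
  · refine ⟨max mh (pvH G c h), max mw (wp + pvL G c - 1), wp + pvL G c - 1,
      by rw [hchar, if_neg hcs], ?_, ?_, rfl⟩
    · rw [pvIfMax, ← max_assoc, max_self]
    · rw [pvIfMax, ← max_assoc, max_self]

-- B's inner fold in closed form
theorem pvRestFormula (G : List (Int × List Int)) (f : Nat) (h : Int) :
    ∀ cs : List Int,
      (∀ c ∈ cs, ∀ h', pvScan G f c h' = some (pvL G c, pvH G c h')) →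
      ∀ t b : Int, pvScanRest G f h cs (t, b) =
        some (t + (cs.map (pvL G)).sum, cs.foldl (fun a c => max a (pvH G c h)) b) := by
  intro cs
  induction cs with
  | nil => intro _ t b; simp [pvScanRest]
  | cons c rest ih =>
    intro hc t b
    simp only [pvScanRest]
    rw [hc c (by simp) h]
    dsimp only
    rw [ih (fun c' hc' => hc c' (by simp [hc']))]
    simp only [List.map_cons, List.sum_cons, List.foldl_cons]
    congr 2
    ring

-- A's loop over the non-first children in closed form
theorem pvLoopChar (G : List (Int × List Int)) (f : Nat) (h : Int) :
    ∀ cs : List Int,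
      (∀ c ∈ cs, ∀ hc wp mh mw, ∃ th tw w', FindAspectRatio_fuel G f hc wp c mh mw = some (th, tw, w') ∧
        (if th > mh then th else mh) = max mh (pvH G c hc) ∧
        (if tw > mw then tw else mw) = max mw (wp + pvL G c - 1) ∧
        w' = wp + pvL G c - 1) →
      (∀ c ∈ cs, 1 ≤ pvL G c) →
      ∀ (i : Nat) (w mh mw : Int), w ≤ mw →
        FindAspectRatio_loop G f h (i + 1) cs w mh mw =
          some (cs.foldl (fun a c => max a (pvH G c h)) mh,
                max mw (w + (cs.map (pvL G)).sum),
                w + (cs.map (pvL G)).sum) := by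
  intro cs
  induction cs with
  | nil =>
    intro _ _ i w mh mw hw
    simp only [FindAspectRatio_loop, List.map_nil, List.sum_nil, List.foldl_nil, add_zero]
    rw [max_eq_left hw]
  | cons c rest ih =>
    intro hstep hpos i w mh mw hw
    simp only [FindAspectRatio_loop]
    obtain ⟨th, tw, w', heq, hth, htw, hw'⟩ := hstep c (by simp) h (w + 1) mh mw
    rw [if_neg (by omega : ¬ i + 1 = 0), heq]
    dsimp only
    rw [hth, htw]
    have hrest : 0 ≤ (rest.map (pvL G)).sum :=
      pv_sum_nonneg G rest (fun c' hc' => hpos c' (by simp [hc']))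
    have hwle : w' ≤ max mw (w + 1 + pvL G c - 1) :=
      le_trans (by omega : w' ≤ w + 1 + pvL G c - 1) (le_max_right _ _)
    rw [ih (fun c' hc' => hstep c' (by simp [hc'])) (fun c' hc' => hpos c' (by simp [hc']))
        (i + 1) w' (max mh (pvH G c h)) (max mw (w + 1 + pvL G c - 1)) hwle]
    simp only [List.map_cons, List.sum_cons, List.foldl_cons]
    have e1 : w' + (rest.map (pvL G)).sum = w + (pvL G c + (rest.map (pvL G)).sum) := by omega
    have e2 : w + 1 + pvL G c - 1 = w + pvL G c := by omega
    rw [e1, e2, max_assoc]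
    have e3 : max (w + pvL G c) (w + (pvL G c + (rest.map (pvL G)).sum)) =
        w + (pvL G c + (rest.map (pvL G)).sum) := max_eq_right (by omega)
    rw [e3]

-- the main induction, on the length of the remaining ancestor budget: characterization of both
-- A's recursion and B's scan on nodes reachable from root
theorem pvMain (G : List (Int × List Int)) (h0 w0 root mh0 mw0 : Int)
    (hPre : Pre_FindAspectRatio G h0 w0 root mh0 mw0) :
    ∀ (k : Nat) (P : List Int) (n : Int),
      G.length + 1 - P.length ≤ k →
      pvChainOK G P n → (P ++ [n]).Nodup →
      (∀ p ∈ P, (pvKeys G).contains p = true) →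
      n ∈ pvReach G root → (pvKeys G).contains n = true →
      ((∀ (f : Nat) (h : Int), G.length + 1 - P.length ≤ f → pvScan G f n h = some (pvL G n, pvH G n h)) ∧
       1 ≤ pvL G n ∧
       (pvChildren G n = [] → pvL G n = 1 ∧ ∀ h, pvH G n h = h) ∧
       (∀ (f : Nat) (h w mh mw : Int), G.length + 1 - P.length ≤ f →
          FindAspectRatio_fuel G f h w n mh mw =
            if pvChildren G n = [] then some (h, w, w)
            else some (max mh (pvH G n h), max mw (w + pvL G n - 1), w + pvL G n - 1))) := by
  intro k
  induction k with
  | zero =>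
    intro P n hrk _ hnd hkeysP _ hk
    have hPn : (P ++ [n]).length ≤ G.length := by
      apply pv_nodup_length_le G _ hnd
      intro p hp
      rcases List.mem_append.mp hp with hp | hp
      · exact hkeysP p hp
      · simp at hp; subst hp; exact hk
    have : P.length + 1 ≤ G.length := by simpa using hPn
    omega
  | succ k IH =>
    intro P n hrk hchain hnd hkeysP hr hk
    have hPn : (P ++ [n]).length ≤ G.length := by
      apply pv_nodup_length_le G _ hnd
      intro p hp
      rcases List.mem_append.mp hp with hp | hp
      · exact hkeysP p hp
      · simp at hp; subst hp; exact hk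
    have hPlen : P.length + 1 ≤ G.length := by simpa using hPn
    have hlook := pv_lookup_eq G n hk
    -- facts about each child
    have hkeysP' : ∀ p ∈ P ++ [n], (pvKeys G).contains p = true := by
      intro p hp
      rcases List.mem_append.mp hp with hp | hp
      · exact hkeysP p hp
      · simp at hp; subst hp; exact hk
    have hchild : ∀ c ∈ pvChildren G n,
        c ∈ pvReach G root ∧ (pvKeys G).contains c = true ∧
        pvChainOK G (P ++ [n]) c ∧ ((P ++ [n]) ++ [c]).Nodup := by
      intro c hc
      obtain ⟨hck, hcr⟩ := pv_pre_child G h0 w0 root mh0 mw0 hPre n hr c hc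
      have hch : pvChainOK G (P ++ [n]) c := pv_chain_extend G P n c hchain hc
      have hnotin : c ∉ P ++ [n] := pv_no_revisit G h0 w0 root mh0 mw0 hPre P n c hch hcr hnd hkeysP'
      refine ⟨hcr, hck, hch, ?_⟩
      rw [List.nodup_append]
      refine ⟨hnd, by simp, ?_⟩
      · intro a ha b hb
        rw [List.mem_singleton] at hb
        subst hb
        intro hab
        rw [hab] at ha
        exact hnotin ha
    have IHc : ∀ c ∈ pvChildren G n,
        (∀ (f : Nat) (h : Int), G.length + 1 - (P ++ [n]).length ≤ f → pvScan G f c h = some (pvL G c, pvH G c h)) ∧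
        1 ≤ pvL G c ∧
        (pvChildren G c = [] → pvL G c = 1 ∧ ∀ h, pvH G c h = h) ∧
        (∀ (f : Nat) (h w mh mw : Int), G.length + 1 - (P ++ [n]).length ≤ f →
          FindAspectRatio_fuel G f h w c mh mw =
            if pvChildren G c = [] then some (h, w, w)
            else some (max mh (pvH G c h), max mw (w + pvL G c - 1), w + pvL G c - 1)) := by
      intro c hc
      obtain ⟨h1, h2, h3, h4⟩ := hchild c hc
      exact IH (P ++ [n]) c (by simp; omega) h3 h4 hkeysP' h1 h2
    -- the value of pvScan, uniformly in the fuel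
    have hval : ∀ (f : Nat) (h : Int), G.length + 1 - P.length ≤ f →
        pvScan G f n h = (match pvChildren G n with
          | [] => some ((1 : Int), h)
          | c :: rest => some (pvL G c + (rest.map (pvL G)).sum,
              rest.foldl (fun a c' => max a (pvH G c' h)) (pvH G c (h + 1)))) := by
      intro f h hf
      obtain ⟨f', rfl⟩ : ∃ f', f = f' + 1 := ⟨f - 1, by omega⟩
      cases hcs : pvChildren G n with
      | nil =>
        simp only [pvScan]
        rw [hlook, hcs]
      | cons c rest =>
        have hfc : G.length + 1 - (P ++ [n]).length ≤ f' := by simp; omega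
        simp only [pvScan]
        rw [hlook, hcs]
        dsimp only
        rw [(IHc c (by rw [hcs]; simp)).1 f' (h + 1) hfc]
        dsimp only
        rw [pvRestFormula G f' h rest
            (fun c' hc' h' => (IHc c' (by rw [hcs]; simp [hc'])).1 f' h' hfc)]
    have hFval : G.length + 1 - P.length ≤ pvF G := by unfold pvF; omega
    have hL : pvL G n = (match pvChildren G n with
        | [] => (1 : Int)
        | c :: rest => pvL G c + (rest.map (pvL G)).sum) := by
      unfold pvL
      rw [hval (pvF G) 0 hFval]
      cases pvChildren G n <;> rfl
    have hH : ∀ h, pvH G n h = (match pvChildren G n with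
        | [] => h
        | c :: rest => rest.foldl (fun a c' => max a (pvH G c' h)) (pvH G c (h + 1))) := by
      intro h
      unfold pvH
      rw [hval (pvF G) h hFval]
      cases pvChildren G n <;> rfl
    have part1 : ∀ (f : Nat) (h : Int), G.length + 1 - P.length ≤ f → pvScan G f n h = some (pvL G n, pvH G n h) := by
      intro f h hf
      rw [hval f h hf, hL, hH h]
      cases pvChildren G n <;> rfl
    have part2 : 1 ≤ pvL G n := by
      rw [hL]
      cases hcs : pvChildren G n with
      | nil => norm_num
      | cons c rest =>
        have h1 := (IHc c (by rw [hcs]; simp)).2.1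
        have h2 := pv_sum_nonneg G rest (fun c' hc' => (IHc c' (by rw [hcs]; simp [hc'])).2.1)
        dsimp only
        linarith
    have part3 : pvChildren G n = [] → pvL G n = 1 ∧ ∀ h, pvH G n h = h := by
      intro hcs
      refine ⟨by rw [hL, hcs], fun h => by rw [hH h, hcs]⟩
    refine ⟨part1, part2, part3, ?_⟩
    intro f h w mh mw hf
    obtain ⟨f', rfl⟩ : ∃ f', f = f' + 1 := ⟨f - 1, by omega⟩
    have hfc : G.length + 1 - (P ++ [n]).length ≤ f' := by simp; omega
    have hstep : ∀ c ∈ pvChildren G n, ∀ hc wp mh' mw',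
        ∃ th tw w', FindAspectRatio_fuel G f' hc wp c mh' mw' = some (th, tw, w') ∧
          (if th > mh' then th else mh') = max mh' (pvH G c hc) ∧
          (if tw > mw' then tw else mw') = max mw' (wp + pvL G c - 1) ∧
          w' = wp + pvL G c - 1 := by
      intro c hc
      exact pvStepChar G c f'
        (fun h' w' mh' mw' => (IHc c hc).2.2.2 f' h' w' mh' mw' hfc)
        (IHc c hc).2.2.1
    cases hcs : pvChildren G n with
    | nil =>
      simp [FindAspectRatio_fuel, hlook, hcs]
    | cons c rest =>
      rw [if_neg (by simp)]
      simp only [FindAspectRatio_fuel]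
      rw [hlook, hcs]
      dsimp only
      rw [if_neg (by simp)]
      -- first iteration (i = 0)
      simp only [FindAspectRatio_loop]
      obtain ⟨th, tw, w', heq, hth, htw, hw'⟩ :=
        hstep c (by rw [hcs]; simp) (h + 1) w mh mw
      rw [if_pos trivial, heq]
      dsimp only
      rw [hth, htw]
      have hrest0 : 0 ≤ (rest.map (pvL G)).sum :=
        pv_sum_nonneg G rest (fun c' hc' => (IHc c' (by rw [hcs]; simp [hc'])).2.1)
      rw [pvLoopChar G f' h rest
          (fun c' hc' => hstep c' (by rw [hcs]; simp [hc']))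
          (fun c' hc' => (IHc c' (by rw [hcs]; simp [hc'])).2.1)
          0 w' (max mh (pvH G c (h + 1))) (max mw (w + pvL G c - 1))
          (le_trans (by omega) (le_max_right _ _))]
      rw [pv_foldl_max_base]
      rw [hL, hH h, hcs]
      dsimp only
      have e1 : w' + (rest.map (pvL G)).sum = w + (pvL G c + (rest.map (pvL G)).sum) - 1 := by omega
      rw [e1, max_assoc]
      have e2 : max (w + pvL G c - 1) (w + (pvL G c + (rest.map (pvL G)).sum) - 1) =
          w + (pvL G c + (rest.map (pvL G)).sum) - 1 := max_eq_right (by omega)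
      rw [e2]

theorem FindAspectRatio_witness_ok :
    Dom_FindAspectRatio pvWitness_FindAspectRatio.1 pvWitness_FindAspectRatio.2.1 pvWitness_FindAspectRatio.2.2.1 pvWitness_FindAspectRatio.2.2.2.1 pvWitness_FindAspectRatio.2.2.2.2.1 pvWitness_FindAspectRatio.2.2.2.2.2 ∧
    Pre_FindAspectRatio pvWitness_FindAspectRatio.1 pvWitness_FindAspectRatio.2.1 pvWitness_FindAspectRatio.2.2.1 pvWitness_FindAspectRatio.2.2.2.1 pvWitness_FindAspectRatio.2.2.2.2.1 pvWitness_FindAspectRatio.2.2.2.2.2 := by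
  constructor <;> decide

-- ===== VERDICT (by name: the statement is the Claim_ definition above) =====
theorem FindAspectRatio_spec : Claim_equal_FindAspectRatio := by
  intro G h_ w root max_h max_w _ hPre
  unfold Spec_FindAspectRatio
  have hk := pv_pre_root G h_ w root max_h max_w hPre
  have hr := pv_root_mem_reach G root
  have hlook := pv_lookup_eq G root hk
  obtain ⟨hscan, _, _, hA⟩ :=
    pvMain G h_ w root max_h max_w hPre (G.length + 1) [] root (by simp) trivial (by simp)
      (by simp) hr hk
  unfold FindAspectRatio FindAspectRatio_alt
  rw [hlook]
  cases hcs : pvChildren G root with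
  | nil =>
    rw [hA (G.length + 1) h_ w max_h max_w (by simp), if_pos hcs]
    rfl
  | cons c rest =>
    rw [hA (G.length + 1) h_ w max_h max_w (by simp), if_neg (by rw [hcs]; simp)]
    rw [hscan (G.length + 1) h_ (by simp)]
    rfl
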